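-- pv_equiv track=rewrite | github.com/Gatchwar/ProjectEuler | Q51_prime_digits_replacement.py | build
-- ===== SOURCE A (Python) =====
-- digits = 6
--
-- def build(ind1, ind2, dig1, dig2, dig3, dig4):
--     arr = ['x', 'x', 'x', 'x', 'x', 'x']
--     arr[ind1] = '*'
--     arr[ind2] = '*'
--     for i in range(digits):
--         if arr[i] == 'x':
--             arr[i] = dig1
--             break
--     for i in range(1, digits):
--         if arr[i] == 'x':
--             arr[i] = dig2
--             break
--     for i in range(2, digits):
--         if arr[i] == 'x':
--             arr[i] = dig3
--             break
--     for i in range(3, digits):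
--         if arr[i] == 'x':
--             arr[i] = dig4
--             break
--     return arr
-- ===== SOURCE B (Python) =====
-- def build(ind1, ind2, dig1, dig2, dig3, dig4):
--     p1 = range(6)[ind1]
--     p2 = range(6)[ind2]
--     digs = iter((dig1, dig2, dig3, dig4))
--     return ['*' if i == p1 or i == p2 else next(digs, 'x') for i in range(6)]
-- ===== Notes on version B (the rewrite author's own statement) =====
-- stated objective: simpler
-- what changed: A mutates a six-cell sentinel array through four separate scan-and-break loops with staggered start offsets; B never mutates an array at all: it normalises the two star positions via range(6) indexing and emits the result in one comprehension, handing digits from an iterator to the non-star slots left to right.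
-- intended difference: On in-range inputs where some digit argument j in {1,2,3} equals the sentinel 'x', a star lies below position j, and the digits after j are not all 'x', A's scan j+1 re-captures the already-placed digit j and overwrites it (dropping it and shifting the later digits, e.g. A returns ['*','1','2','3','x','x'] at (0,0,'x','1','2','3')), while B returns ['*','x','1','2','3','x'], keeping each digit at the slot it was assigned, which is the intended placement; the overwrite is an artefact of A's in-place 'x' marker. — e.g. on build(0, 0, "x", "1", "2", "3"): A returns ["*", "1", "2", "3", "x", "x"], B returns ["*", "x", "1", "2", "3", "x"]
import Mathlib
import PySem

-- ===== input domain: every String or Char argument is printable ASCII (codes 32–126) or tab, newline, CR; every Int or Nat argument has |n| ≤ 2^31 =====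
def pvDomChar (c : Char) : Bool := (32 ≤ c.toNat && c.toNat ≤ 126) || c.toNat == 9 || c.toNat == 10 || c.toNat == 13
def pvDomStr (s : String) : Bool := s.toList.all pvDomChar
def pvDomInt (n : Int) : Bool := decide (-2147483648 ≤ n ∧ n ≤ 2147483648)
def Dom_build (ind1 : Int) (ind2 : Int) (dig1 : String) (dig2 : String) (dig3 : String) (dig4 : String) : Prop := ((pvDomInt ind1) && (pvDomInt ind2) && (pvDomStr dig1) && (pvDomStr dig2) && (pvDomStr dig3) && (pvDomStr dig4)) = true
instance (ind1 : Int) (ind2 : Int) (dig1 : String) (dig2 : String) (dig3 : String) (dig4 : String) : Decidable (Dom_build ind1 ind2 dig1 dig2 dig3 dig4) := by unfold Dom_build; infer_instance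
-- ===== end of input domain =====

-- B replaces A's four mutate-scan-break loops over a sentinel array with a single pure
-- comprehension that places '*' at the two normalised star positions and hands the four
-- digits to the remaining slots left to right (objective: simpler); on sentinel-collision
-- inputs (D_build below) B keeps each digit at its slot where A accidentally re-captures it.


-- ===== PORT A =====
-- one of A's four identical 'for i in range(k, 6): if arr[i] == "x": arr[i] = d; break' loops
def buildFillLoop (arr : List String) (is : List Int) (d : String) : List String :=
  match is with
  | [] => arr
  | i :: rest =>
    if PySem.List.pyGetD arr i "" == "x" then PySem.List.pySetD arr i d
    else buildFillLoop arr rest d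

def build (ind1 : Int) (ind2 : Int) (dig1 : String) (dig2 : String) (dig3 : String) (dig4 : String) : List String :=
  let arr := ["x", "x", "x", "x", "x", "x"]
  let arr := PySem.List.pySetD arr ind1 "*"
  let arr := PySem.List.pySetD arr ind2 "*"
  let arr := buildFillLoop arr (PySem.List.pyRange 0 6 1) dig1
  let arr := buildFillLoop arr (PySem.List.pyRange 1 6 1) dig2
  let arr := buildFillLoop arr (PySem.List.pyRange 2 6 1) dig3
  let arr := buildFillLoop arr (PySem.List.pyRange 3 6 1) dig4
  arr

-- ===== PORT B =====
-- B's comprehension "['*' if i == p1 or i == p2 else next(digs, 'x') for i in range(6)]",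
-- carrying the digit iterator as the list of digits not yet consumed
def buildAltComp (p1 p2 : Int) (is : List Int) (digs : List String) : List String :=
  match is with
  | [] => []
  | i :: rest =>
    if i == p1 || i == p2 then "*" :: buildAltComp p1 p2 rest digs
    else
      match digs with
      | [] => "x" :: buildAltComp p1 p2 rest []
      | d :: ds => d :: buildAltComp p1 p2 rest ds

def build_alt (ind1 : Int) (ind2 : Int) (dig1 : String) (dig2 : String) (dig3 : String) (dig4 : String) : List String :=
  -- p1 = range(6)[ind1]; p2 = range(6)[ind2]  (pyGet? none = IndexError, excluded by Pre_)
  match PySem.List.pyGet? (PySem.List.pyRange 0 6 1) ind1,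
        PySem.List.pyGet? (PySem.List.pyRange 0 6 1) ind2 with
  | some p1, some p2 => buildAltComp p1 p2 (PySem.List.pyRange 0 6 1) [dig1, dig2, dig3, dig4]
  | _, _ => []

-- ===== PRECONDITION & SPEC =====
-- Python index normalisation for a length-6 list (used only to state Pre_/D_)
def pvNorm (i : Int) : Int := if i < 0 then i + 6 else i

-- Pre_ excludes exactly the out-of-range star indices, on which A raises IndexError (so does B).
def Pre_build (ind1 : Int) (ind2 : Int) (dig1 : String) (dig2 : String) (dig3 : String) (dig4 : String) : Prop :=
  PySem.Raise.InRange 6 ind1 ∧ PySem.Raise.InRange 6 ind2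
instance (ind1 : Int) (ind2 : Int) (dig1 : String) (dig2 : String) (dig3 : String) (dig4 : String) : Decidable (Pre_build ind1 ind2 dig1 dig2 dig3 dig4) := by unfold Pre_build; infer_instance

def pvWitness_build : Int × Int × String × String × String × String := (0, 3, "1", "2", "3", "4")

-- On inputs where some digit argument j ∈ {1,2,3} equals A's sentinel "x", a star sits below
-- position j, and the digits after j are not all "x", A's scan j+1 re-captures the already
-- placed digit j and overwrites it (dropping it and shifting the later digits), while B keeps
-- every digit at the slot it was assigned; B's value is the intended one, the overwrite being
-- an artefact of A's in-place "x" marker.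
def D_build (ind1 : Int) (ind2 : Int) (dig1 : String) (dig2 : String) (dig3 : String) (dig4 : String) : Prop :=
  ∃ j : Nat, j < 3 ∧ [dig1, dig2, dig3][j]! = "x" ∧
    min (pvNorm ind1) (pvNorm ind2) ≤ (j : Int) ∧
    [dig2, dig3, dig4].drop j ≠ List.replicate (3 - j) "x"
instance (ind1 : Int) (ind2 : Int) (dig1 : String) (dig2 : String) (dig3 : String) (dig4 : String) : Decidable (D_build ind1 ind2 dig1 dig2 dig3 dig4) := by unfold D_build; infer_instance

def Spec_build (ind1 : Int) (ind2 : Int) (dig1 : String) (dig2 : String) (dig3 : String) (dig4 : String) (out : List String) : Prop := ¬ D_build ind1 ind2 dig1 dig2 dig3 dig4 → out = build_alt ind1 ind2 dig1 dig2 dig3 dig4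
instance (ind1 : Int) (ind2 : Int) (dig1 : String) (dig2 : String) (dig3 : String) (dig4 : String) (out : List String) : Decidable (Spec_build ind1 ind2 dig1 dig2 dig3 dig4 out) := by unfold Spec_build; infer_instance

def pvDiffWitness_build : Int × Int × String × String × String × String := (0, 0, "x", "1", "2", "3")
def pvDiffWitnessOut_build : (List String) × (List String) := (["*", "1", "2", "3", "x", "x"], ["*", "x", "1", "2", "3", "x"])

-- ===== CLAIM (what is proved, stated in full; the proofs are below) =====
def Claim_unchanged_build : Prop := ∀ (ind1 : Int) (ind2 : Int) (dig1 : String) (dig2 : String) (dig3 : String) (dig4 : String), Dom_build ind1 ind2 dig1 dig2 dig3 dig4 → Pre_build ind1 ind2 dig1 dig2 dig3 dig4 → Spec_build ind1 ind2 dig1 dig2 dig3 dig4 (build ind1 ind2 dig1 dig2 dig3 dig4)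
def Claim_changed_build : Prop := Dom_build (pvDiffWitness_build.1) (pvDiffWitness_build.2.1) (pvDiffWitness_build.2.2.1) (pvDiffWitness_build.2.2.2.1) (pvDiffWitness_build.2.2.2.2.1) (pvDiffWitness_build.2.2.2.2.2) ∧ Pre_build (pvDiffWitness_build.1) (pvDiffWitness_build.2.1) (pvDiffWitness_build.2.2.1) (pvDiffWitness_build.2.2.2.1) (pvDiffWitness_build.2.2.2.2.1) (pvDiffWitness_build.2.2.2.2.2) ∧ D_build (pvDiffWitness_build.1) (pvDiffWitness_build.2.1) (pvDiffWitness_build.2.2.1) (pvDiffWitness_build.2.2.2.1) (pvDiffWitness_build.2.2.2.2.1) (pvDiffWitness_build.2.2.2.2.2) ∧ build (pvDiffWitness_build.1) (pvDiffWitness_build.2.1) (pvDiffWitness_build.2.2.1) (pvDiffWitness_build.2.2.2.1) (pvDiffWitness_build.2.2.2.2.1) (pvDiffWitness_build.2.2.2.2.2) = pvDiffWitnessOut_build.1 ∧ build_alt (pvDiffWitness_build.1) (pvDiffWitness_build.2.1) (pvDiffWitness_build.2.2.1) (pvDiffWitness_build.2.2.2.1) (pvDiffWitness_build.2.2.2.2.1)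 (pvDiffWitness_build.2.2.2.2.2) = pvDiffWitnessOut_build.2 ∧ pvDiffWitnessOut_build.1 ≠ pvDiffWitnessOut_build.2

-- ===== LEMMAS AND PROOFS =====

-- proof-side model of one A-loop: replace the first "x" of the list
def pvFill : List String → String → List String
  | [], _ => []
  | a :: t, d => if a = "x" then d :: t else a :: pvFill t d

-- proof-side common model: hand the digits to the "x" slots left to right
def pvPass : List String → List String → List String
  | [], _ => []
  | a :: t, [] => a :: t
  | a :: t, d :: ds => if a = "x" then d :: pvPass t ds else a :: pvPass t (d :: ds)

theorem pvPass_nil (l : List String) : pvPass l [] = l := by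
  cases l <;> rfl

theorem pvPass_cons_ne (a : String) (t digs : List String) (h : a ≠ "x") :
    pvPass (a :: t) digs = a :: pvPass t digs := by
  cases digs <;> simp [pvPass, pvPass_nil, h]

theorem pvPass_length (arr digs : List String) : (pvPass arr digs).length = arr.length := by
  induction arr generalizing digs with
  | nil => rfl
  | cons a t ih =>
    cases digs with
    | nil => rfl
    | cons d ds => by_cases h : a = "x" <;> simp [pvPass, h, ih]

theorem pv_set_big {α : Type} (l : List α) (n : Nat) (a : α) (h : l.length ≤ n) :
    l.set n a = l := by
  induction l generalizing n with
  | nil => simp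
  | cons b t ih =>
    cases n with
    | zero => simp at h
    | succ n => simp [ih n (by simpa using h)]

-- a pass with a single remaining digit is a fill
theorem pass_single (arr : List String) (d : String) : pvPass arr [d] = pvFill arr d := by
  induction arr with
  | nil => rfl
  | cons a t ih =>
    by_cases ha : a = "x" <;> simp [pvPass, pvFill, pvPass_nil, ha, ih]

-- filling with the sentinel itself changes nothing
theorem fill_x (l : List String) : pvFill l "x" = l := by
  induction l with
  | nil => rfl
  | cons a t ih => by_cases h : a = "x" <;> simp [pvFill, h, ih]

-- a pass whose digits are all "x" changes nothing
theorem pvPass_allx (arr : List String) : ∀ ds : List String, (∀ x ∈ ds, x = "x") → pvPass arr ds = arr := by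
  induction arr with
  | nil => intro ds _; rfl
  | cons a t ih =>
    intro ds h
    cases ds with
    | nil => rfl
    | cons d rest =>
      by_cases ha : a = "x"
      · have hd : d = "x" := h d (by simp)
        simp [pvPass, ha, hd, ih rest (fun x hx => h x (by simp [hx]))]
      · rw [pvPass_cons_ne a t _ ha, ih (d :: rest) h]

-- an appended sentinel digit changes nothing: it lands on an "x" slot
theorem pvPass_append_x (arr : List String) : ∀ ds : List String, pvPass arr (ds ++ ["x"]) = pvPass arr ds := by
  induction arr with
  | nil => intro ds; rfl
  | cons a t ih =>
    intro ds
    by_cases ha : a = "x"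
    · subst ha
      cases ds with
      | nil => simp [pvPass, pvPass_nil]
      | cons d rest => simp [pvPass, ih rest]
    · rw [pvPass_cons_ne a t _ ha, pvPass_cons_ne a t ds ha, ih ds]

-- filling after a pass whose digits are all ≠ "x" appends the digit to the pass
theorem fill_pass (arr : List String) (ds : List String) (d : String)
    (h : ∀ x ∈ ds, x ≠ "x") :
    pvFill (pvPass arr ds) d = pvPass arr (ds ++ [d]) := by
  induction arr generalizing ds with
  | nil => simp [pvPass, pvFill]
  | cons a t ih =>
    cases ds with
    | nil => simpa [pvPass_nil] using (pass_single (a :: t) d).symm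
    | cons e es =>
      have he : e ≠ "x" := h e (by simp)
      by_cases ha : a = "x"
      · subst ha
        simp [pvPass, pvFill, he, ih es (fun x hx => h x (by simp [hx]))]
      · simp [pvPass, pvFill, ha, ih (e :: es) h]

-- cutting a pass with all digits ≠ "x" at any point ≤ its digit count and filling the rest
theorem stage_strong (arr : List String) : ∀ (ds : List String) (d : String) (j : Nat),
    (∀ x ∈ ds, x ≠ "x") → j ≤ ds.length →
    (pvPass arr ds).take j ++ pvFill ((pvPass arr ds).drop j) d = pvPass arr (ds ++ [d]) := by
  induction arr with
  | nil => intro ds d j h hj; simp [pvPass, pvFill]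
  | cons a t ih =>
    intro ds d j h hj
    cases j with
    | zero => simpa using fill_pass (a :: t) ds d h
    | succ j =>
      cases ds with
      | nil => simp at hj
      | cons e es =>
        have hj' : j ≤ es.length := by simpa using hj
        by_cases ha : a = "x"
        · subst ha
          have pw1 : pvPass ("x" :: t) (e :: es) = e :: pvPass t es := by simp [pvPass]
          have pw2 : pvPass ("x" :: t) (e :: (es ++ [d])) = e :: pvPass t (es ++ [d]) := by
            simp [pvPass]
          rw [List.cons_append, pw1, pw2, List.take_succ_cons, List.drop_succ_cons,
              List.cons_append, ih es d j (fun x hx => h x (by simp [hx])) hj']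
        · rw [pvPass_cons_ne a t (e :: es) ha, pvPass_cons_ne a t ((e :: es) ++ [d]) ha,
              List.take_succ_cons, List.drop_succ_cons, List.cons_append,
              ih (e :: es) d j h (by simp only [List.length_cons]; omega)]

-- one more A-loop on top of a pass extends the pass by one digit, provided each digit that
-- equals "x" was handed to a slot before the next loop's start (an all-"x" prefix)
theorem stage (arr : List String) : ∀ (ds : List String) (d : String),
    (∀ i, (h : i < ds.length) → ds[i] ≠ "x" ∨ (∀ a ∈ arr.take (i + 1), a = "x")) →
    (pvPass arr ds).take ds.length ++ pvFill ((pvPass arr ds).drop ds.length) d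
      = pvPass arr (ds ++ [d]) := by
  induction arr with
  | nil => intro ds d _; simp [pvPass, pvFill]
  | cons a t ih =>
    intro ds d hadm
    cases ds with
    | nil => simpa [pvPass_nil] using (pass_single (a :: t) d).symm
    | cons e es =>
      by_cases ha : a = "x"
      · subst ha
        have hadm' : ∀ i, (h : i < es.length) → es[i] ≠ "x" ∨ (∀ a ∈ t.take (i + 1), a = "x") := by
          intro i hi
          rcases hadm (i + 1) (by simpa using hi) with h' | h'
          · exact Or.inl (by simpa using h')
          · exact Or.inr (fun b hb => h' b (by simp [List.take_succ_cons]; exact Or.inr hb))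
        have pw1 : pvPass ("x" :: t) (e :: es) = e :: pvPass t es := by simp [pvPass]
        have pw2 : pvPass ("x" :: t) (e :: (es ++ [d])) = e :: pvPass t (es ++ [d]) := by
          simp [pvPass]
        rw [List.cons_append, pw1, pw2, List.length_cons, List.take_succ_cons,
            List.drop_succ_cons, List.cons_append, ih es d hadm']
      · have hne : ∀ x ∈ (e :: es), x ≠ "x" := by
          intro x hx
          obtain ⟨i, hi, rfl⟩ := List.mem_iff_getElem.mp hx
          rcases hadm i hi with h' | h'
          · exact h'
          · exact absurd (h' a (by simp [List.take_succ_cons])) ha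
        exact stage_strong (a :: t) (e :: es) d (e :: es).length hne (le_refl _)

-- pySetD at an in-range index is List.set at the normalised position
def pvNormN (n : Nat) (i : Int) : Nat := if 0 ≤ i then i.toNat else n - (-i).toNat

theorem pySetD_inrange (xs : List String) (i : Int) (v : String)
    (h : PySem.Raise.InRange xs.length i) :
    PySem.List.pySetD xs i v = xs.set (pvNormN xs.length i) v := by
  obtain ⟨hl, hr⟩ := h
  by_cases h0 : 0 ≤ i
  · simp [PySem.List.pySetD, PySem.List.pySet?, PySem.List.pyIdx?, pvNormN, h0, hr]
  · simp [PySem.List.pySetD, PySem.List.pySet?, PySem.List.pyIdx?, pvNormN, h0, hl]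

theorem pvNorm_toNat (i : Int) (j : Nat) (h : PySem.Raise.InRange 6 i)
    (hj : (j : Int) ≤ pvNorm i) : j ≤ pvNormN 6 i := by
  obtain ⟨hl, hr⟩ := h
  unfold pvNorm at hj
  unfold pvNormN
  split_ifs at hj ⊢ <;> omega

theorem pvNormN_lt (i : Int) (h : PySem.Raise.InRange 6 i) : pvNormN 6 i < 6 := by
  obtain ⟨hl, hr⟩ := h
  unfold pvNormN
  split_ifs <;> omega

-- arr.take (k+1) as a concatenation
theorem pv_take_succ (k : Nat) (arr : List String) (hklen : k < arr.length) :
    arr.take (k + 1) = arr.take k ++ [arr[k]] := by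
  rw [List.take_add_one, List.getElem?_eq_getElem hklen]
  rfl

-- A's index loop over range(k, len) is take/fill/drop
theorem bridgeA (m : Nat) : ∀ (k : Nat) (a b : Int) (arr : List String) (d : String),
    a = (k : Nat) → b = ((k + m : Nat) : Int) → arr.length = k + m →
    buildFillLoop arr (PySem.List.pyRange a b 1) d = arr.take k ++ pvFill (arr.drop k) d := by
  induction m with
  | zero =>
    intro k a b arr d ha hb h
    subst ha hb
    rw [PySem.List.pyRange_one_eq_nil (by push_cast; omega)]
    have hdrop : arr.drop k = [] := List.drop_eq_nil_of_le (by omega)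
    have htake : arr.take k = arr := List.take_of_length_le (by omega)
    simp [buildFillLoop, hdrop, htake, pvFill]
  | succ m ih =>
    intro k a b arr d ha hb h
    subst ha hb
    have hklen : k < arr.length := by omega
    have hk : ((k : Nat) : Int) < ((k + (m + 1) : Nat) : Int) := by push_cast; omega
    rw [PySem.List.pyRange_one_cons hk]
    simp only [buildFillLoop, PySem.List.pyGetD_natCast, PySem.List.pySetD_natCast]
    rw [List.getD_eq_getElem arr "" hklen]
    by_cases hx : arr[k] = "x"
    · rw [hx]
      simp only [beq_self_eq_true, if_true]
      rw [List.set_eq_take_cons_drop d hklen]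
      conv_rhs => rw [List.drop_eq_getElem_cons hklen, hx]
      simp [pvFill]
    · have hbeq : (arr[k] == "x") = false := by simpa using hx
      simp only [hbeq, Bool.false_eq_true, if_false]
      rw [ih (k + 1) _ _ arr d (by push_cast; ring) (by push_cast; ring) (by omega)]
      conv_rhs => rw [List.drop_eq_getElem_cons hklen]
      have hfe : pvFill (arr[k] :: arr.drop (k + 1)) d = arr[k] :: pvFill (arr.drop (k + 1)) d := by
        simp [pvFill, hx]
      rw [hfe, pv_take_succ k arr hklen, List.append_assoc]
      rfl

-- A's loop with digit "x" replaces the first remaining "x" by "x": the identity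
theorem loopA_x (m k : Nat) (a b : Int) (arr : List String)
    (ha : a = (k : Nat)) (hb : b = ((k + m : Nat) : Int)) (h : arr.length = k + m) :
    buildFillLoop arr (PySem.List.pyRange a b 1) "x" = arr := by
  rw [bridgeA m k a b arr "x" ha hb h, fill_x, List.take_append_drop]

-- B's comprehension with an exhausted iterator just renders the star mask
theorem comp_nil (p1 p2 : Int) (is : List Int) :
    buildAltComp p1 p2 is []
      = is.map (fun i => if i == p1 || i == p2 then "*" else "x") := by
  induction is with
  | nil => rfl
  | cons i rest ih =>
    simp only [buildAltComp, List.map_cons, ih]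
    by_cases h : (i == p1 || i == p2) = true
    · rw [if_pos h, if_pos h]
    · rw [if_neg h, if_neg h]

-- B's comprehension is the pass over the star mask of its positions
theorem comp_eq_pass (p1 p2 : Int) : ∀ (is : List Int) (digs : List String),
    buildAltComp p1 p2 is digs
      = pvPass (is.map (fun i => if i == p1 || i == p2 then "*" else "x")) digs := by
  intro is
  induction is with
  | nil => intro digs; simp [buildAltComp, pvPass]
  | cons i rest ih =>
    intro digs
    by_cases h : (i == p1 || i == p2) = true
    · have hstar : ("*" : String) ≠ "x" := by decide
      simp only [buildAltComp, List.map_cons]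
      rw [if_pos h, if_pos h, pvPass_cons_ne _ _ _ hstar, ih]
    · cases digs with
      | nil =>
        simp only [buildAltComp, List.map_cons]
        rw [if_neg h, if_neg h, pvPass_nil, comp_nil]
      | cons d ds =>
        simp only [buildAltComp, List.map_cons]
        rw [if_neg h, if_neg h]
        simp [pvPass, ih]

-- range(6)[i] normalises the index
theorem range_get (i : Int) (h : PySem.Raise.InRange 6 i) :
    PySem.List.pyGet? (PySem.List.pyRange 0 6 1) i = some ((pvNormN 6 i : Nat) : Int) := by
  obtain ⟨hl, hr⟩ := h
  have hl' : (-6 : Int) ≤ i := by simpa using hl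
  interval_cases i <;> decide

-- the doubly-set star array is the star mask over range(6)
theorem set_set_eq_mask (a b : Nat) (ha : a < 6) (hb : b < 6) :
    (((["x", "x", "x", "x", "x", "x"] : List String).set a "*").set b "*")
      = (PySem.List.pyRange 0 6 1).map
          (fun i => if i == ((a : Nat) : Int) || i == ((b : Nat) : Int) then "*" else "x") := by
  interval_cases a <;> interval_cases b <;> decide

-- ===== VERDICT (by name: the statements are the Claim_ definitions above) =====
theorem build_spec : Claim_unchanged_build := by
  intro ind1 ind2 dig1 dig2 dig3 dig4 _ hpre hnd
  obtain ⟨h1, h2⟩ := hpre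
  simp only [build, build_alt]
  rw [range_get ind1 h1, range_get ind2 h2]
  set arr0 := PySem.List.pySetD (PySem.List.pySetD ["x", "x", "x", "x", "x", "x"] ind1 "*") ind2 "*" with harr
  have hlen0 : arr0.length = 6 := by simp [harr]
  have e2 : arr0 = ((["x", "x", "x", "x", "x", "x"] : List String).set (pvNormN 6 ind1) "*").set (pvNormN 6 ind2) "*" := by
    rw [harr, pySetD_inrange _ _ _ (by simpa using h2), pySetD_inrange _ _ _ (by simpa using h1)]
    simp
  have hpref : ∀ j : Nat, (j : Int) ≤ pvNorm ind1 → (j : Int) ≤ pvNorm ind2 → j ≤ 6 →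
      ∀ a ∈ arr0.take j, a = "x" := by
    intro j hj1 hj2 hj6 a ha
    have hn1 : j ≤ pvNormN 6 ind1 := pvNorm_toNat ind1 j h1 hj1
    have hn2 : j ≤ pvNormN 6 ind2 := pvNorm_toNat ind2 j h2 hj2
    have htk : arr0.take j = (["x", "x", "x", "x", "x", "x"] : List String).take j := by
      rw [e2, List.take_set, List.take_set,
          pv_set_big _ _ _ (by simp [List.length_take]; omega),
          pv_set_big _ _ _ (by simp [List.length_take]; omega)]
    rw [htk] at ha
    have := List.take_subset j _ ha
    simpa using this
  have c0 : buildAltComp ((pvNormN 6 ind1 : Nat) : Int) ((pvNormN 6 ind2 : Nat) : Int)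
      (PySem.List.pyRange 0 6 1) [dig1, dig2, dig3, dig4]
      = pvPass arr0 [dig1, dig2, dig3, dig4] := by
    rw [comp_eq_pass, ← set_set_eq_mask (pvNormN 6 ind1) (pvNormN 6 ind2)
          (pvNormN_lt ind1 h1) (pvNormN_lt ind2 h2), ← e2]
  have s1 : buildFillLoop arr0 (PySem.List.pyRange 0 6 1) dig1 = pvPass arr0 [dig1] :=
    (bridgeA 6 0 0 6 arr0 dig1 (by norm_num) (by norm_num) (by omega)).trans
      (by simpa using (pass_single arr0 dig1).symm)
  by_cases hP1 : dig1 ≠ "x" ∨ (1 ≤ pvNorm ind1 ∧ 1 ≤ pvNorm ind2)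
  case neg =>
    -- dig1 = "x" re-captured would be a difference, so ¬D forces dig2 = dig3 = dig4 = "x":
    -- all four of A's loops and B's whole digit stream are the identity on arr0
    push_neg at hP1
    obtain ⟨hx1, hm⟩ := hP1
    have ht : dig2 = "x" ∧ dig3 = "x" ∧ dig4 = "x" := by
      by_contra htc
      exact hnd ⟨0, by omega, by simp [hx1], by omega, by simpa using htc⟩
    obtain ⟨hx2, hx3, hx4⟩ := ht
    subst hx1 hx2 hx3 hx4
    rw [loopA_x 6 0 0 6 arr0 (by norm_num) (by norm_num) (by omega),
        loopA_x 5 1 1 6 arr0 (by norm_num) (by norm_num) (by omega),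
        loopA_x 4 2 2 6 arr0 (by norm_num) (by norm_num) (by omega),
        loopA_x 3 3 3 6 arr0 (by norm_num) (by norm_num) (by omega)]
    have hall : ∀ x ∈ (["x", "x", "x", "x"] : List String), x = "x" := by decide
    exact (c0.trans (pvPass_allx arr0 ["x", "x", "x", "x"] hall)).symm
  case pos =>
  have hP1' : dig1 ≠ "x" ∨ ∀ a ∈ arr0.take 1, a = "x" :=
    hP1.imp_right (fun h => hpref 1 (by exact_mod_cast h.1) (by exact_mod_cast h.2) (by omega))
  have adm1 : ∀ i, (h : i < ([dig1] : List String).length) →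
      ([dig1] : List String)[i] ≠ "x" ∨ (∀ a ∈ arr0.take (i + 1), a = "x") := by
    intro i hi
    have hi' : i < 1 := by simpa using hi
    interval_cases i
    · simpa using hP1'
  have s2 : buildFillLoop (pvPass arr0 [dig1]) (PySem.List.pyRange 1 6 1) dig2
      = pvPass arr0 [dig1, dig2] :=
    (bridgeA 5 1 1 6 (pvPass arr0 [dig1]) dig2 (by norm_num) (by norm_num)
        (by simp [pvPass_length, hlen0])).trans
      (by simpa using stage arr0 [dig1] dig2 adm1)
  by_cases hP2 : dig2 ≠ "x" ∨ (2 ≤ pvNorm ind1 ∧ 2 ≤ pvNorm ind2)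
  case neg =>
    -- likewise ¬D forces dig3 = dig4 = "x": loops 2,3,4 and digits 2,3,4 are the identity
    push_neg at hP2
    obtain ⟨hx2, hm⟩ := hP2
    have ht : dig3 = "x" ∧ dig4 = "x" := by
      by_contra htc
      exact hnd ⟨1, by omega, by simp [hx2], by omega, by simpa using htc⟩
    obtain ⟨hx3, hx4⟩ := ht
    subst hx2 hx3 hx4
    rw [s1, loopA_x 5 1 1 6 _ (by norm_num) (by norm_num) (by simp [pvPass_length, hlen0]),
        loopA_x 4 2 2 6 _ (by norm_num) (by norm_num) (by simp [pvPass_length, hlen0]),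
        loopA_x 3 3 3 6 _ (by norm_num) (by norm_num) (by simp [pvPass_length, hlen0])]
    have cc : pvPass arr0 [dig1, "x", "x", "x"] = pvPass arr0 [dig1] := by
      rw [show ([dig1, "x", "x", "x"] : List String) = (([dig1] ++ ["x"]) ++ ["x"]) ++ ["x"] from rfl,
          pvPass_append_x, pvPass_append_x, pvPass_append_x]
    exact (c0.trans cc).symm
  case pos =>
  have hP2' : dig2 ≠ "x" ∨ ∀ a ∈ arr0.take 2, a = "x" :=
    hP2.imp_right (fun h => hpref 2 (by exact_mod_cast h.1) (by exact_mod_cast h.2) (by omega))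
  have adm2 : ∀ i, (h : i < ([dig1, dig2] : List String).length) →
      ([dig1, dig2] : List String)[i] ≠ "x" ∨ (∀ a ∈ arr0.take (i + 1), a = "x") := by
    intro i hi
    have hi' : i < 2 := by simpa using hi
    interval_cases i
    · simpa using hP1'
    · simpa using hP2'
  have s3 : buildFillLoop (pvPass arr0 [dig1, dig2]) (PySem.List.pyRange 2 6 1) dig3
      = pvPass arr0 [dig1, dig2, dig3] :=
    (bridgeA 4 2 2 6 (pvPass arr0 [dig1, dig2]) dig3 (by norm_num) (by norm_num)
        (by simp [pvPass_length, hlen0])).trans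
      (by simpa using stage arr0 [dig1, dig2] dig3 adm2)
  by_cases hP3 : dig3 ≠ "x" ∨ (3 ≤ pvNorm ind1 ∧ 3 ≤ pvNorm ind2)
  case neg =>
    -- likewise ¬D forces dig4 = "x": loops 3,4 and digits 3,4 are the identity
    push_neg at hP3
    obtain ⟨hx3, hm⟩ := hP3
    have hx4 : dig4 = "x" := by
      by_contra htc
      exact hnd ⟨2, by omega, by simp [hx3], by omega, by simpa using htc⟩
    subst hx3 hx4
    rw [s1, s2, loopA_x 4 2 2 6 _ (by norm_num) (by norm_num) (by simp [pvPass_length, hlen0]),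
        loopA_x 3 3 3 6 _ (by norm_num) (by norm_num) (by simp [pvPass_length, hlen0])]
    have cc : pvPass arr0 [dig1, dig2, "x", "x"] = pvPass arr0 [dig1, dig2] := by
      rw [show ([dig1, dig2, "x", "x"] : List String) = (([dig1, dig2] ++ ["x"]) ++ ["x"]) from rfl,
          pvPass_append_x, pvPass_append_x]
    exact (c0.trans cc).symm
  case pos =>
  have hP3' : dig3 ≠ "x" ∨ ∀ a ∈ arr0.take 3, a = "x" :=
    hP3.imp_right (fun h => hpref 3 (by exact_mod_cast h.1) (by exact_mod_cast h.2) (by omega))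
  have adm3 : ∀ i, (h : i < ([dig1, dig2, dig3] : List String).length) →
      ([dig1, dig2, dig3] : List String)[i] ≠ "x" ∨ (∀ a ∈ arr0.take (i + 1), a = "x") := by
    intro i hi
    have hi' : i < 3 := by simpa using hi
    interval_cases i
    · simpa using hP1'
    · simpa using hP2'
    · simpa using hP3'
  have s4 : buildFillLoop (pvPass arr0 [dig1, dig2, dig3]) (PySem.List.pyRange 3 6 1) dig4
      = pvPass arr0 [dig1, dig2, dig3, dig4] :=
    (bridgeA 3 3 3 6 (pvPass arr0 [dig1, dig2, dig3]) dig4 (by norm_num) (by norm_num)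
        (by simp [pvPass_length, hlen0])).trans
      (by simpa using stage arr0 [dig1, dig2, dig3] dig4 adm3)
  rw [s1, s2, s3, s4]
  exact c0.symm

theorem build_changed : Claim_changed_build := by unfold Claim_changed_build; decide
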